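-- pv_equiv track=rewrite | github.com/craftygurl/animalerie | hamsters/views.py | equipement_suivant
-- ===== SOURCE A (Python) =====
-- def equipement_suivant(id_eq):
--     equipements = ["mangeoire", "roue", "nid"]
--     marked = False
--     for e in equipements:
--         if (marked):
--             return e
--         if (e == id_eq):
--             marked = True
--     return equipements[0]
-- ===== SOURCE B (Python) =====
-- def equipement_suivant(id_eq):
--     equipements = ["mangeoire", "roue", "nid"]
--     if id_eq in equipements:
--         idx = equipements.index(id_eq)
--         return equipements[(idx + 1) % len(equipements)]
--     return equipements[0]
-- ===== Notes on version B (the rewrite author's own statement) =====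
-- stated objective: simpler
-- what changed: B replaces A's marked-flag scan (with a wraparound fallback return) by an index lookup plus (idx+1) % len modular arithmetic.
import Mathlib
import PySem

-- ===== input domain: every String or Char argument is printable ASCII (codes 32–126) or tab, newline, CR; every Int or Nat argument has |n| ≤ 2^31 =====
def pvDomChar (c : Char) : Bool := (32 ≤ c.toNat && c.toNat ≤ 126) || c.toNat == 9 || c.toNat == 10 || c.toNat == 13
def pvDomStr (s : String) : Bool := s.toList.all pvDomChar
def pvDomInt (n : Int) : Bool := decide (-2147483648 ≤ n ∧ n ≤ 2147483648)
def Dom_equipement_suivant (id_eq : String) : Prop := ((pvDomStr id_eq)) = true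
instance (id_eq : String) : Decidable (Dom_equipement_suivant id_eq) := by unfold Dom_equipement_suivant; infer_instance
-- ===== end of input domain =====

-- B replaces A's marked-flag scan by an index lookup plus (idx+1) % len modular arithmetic (objective: simpler).

-- ===== PORT A =====
-- A's for-loop with the 'marked' flag: returns some e on the early 'return e', none if the loop ends.
def pvALoop (id_eq : String) : List String → Bool → Option String
  | [], _ => none
  | e :: rest, marked =>
      if marked then some e
      else pvALoop id_eq rest (if e == id_eq then true else marked)

def equipement_suivant (id_eq : String) : String :=
  let equipements := ["mangeoire", "roue", "nid"]
  match pvALoop id_eq equipements false with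
  | some e => e
  | none => equipements[0]!

-- ===== PORT B =====
def equipement_suivant_alt (id_eq : String) : String :=
  let equipements := ["mangeoire", "roue", "nid"]
  if id_eq ∈ equipements then
    match PySem.List.index? equipements id_eq with
    | some idx => (PySem.List.pyGet? equipements (PySem.Int.mod (idx + 1) equipements.length)).getD ""
    | none => equipements[0]!
  else equipements[0]!

-- ===== PRECONDITION & SPEC =====
def Spec_equipement_suivant (id_eq : String) (out : String) : Prop := out = equipement_suivant_alt id_eq
instance (id_eq : String) (out : String) : Decidable (Spec_equipement_suivant id_eq out) := by unfold Spec_equipement_suivant; infer_instance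

-- ===== CLAIM (what is proved, stated in full; the proofs are below) =====
def Claim_equal_equipement_suivant : Prop := ∀ (id_eq : String), Dom_equipement_suivant id_eq → Spec_equipement_suivant id_eq (equipement_suivant id_eq)

-- ===== LEMMAS AND PROOFS =====

-- ===== VERDICT (by name: the statement is the Claim_ definition above) =====
theorem equipement_suivant_spec : Claim_equal_equipement_suivant := by
  intro id_eq _
  unfold Spec_equipement_suivant equipement_suivant equipement_suivant_alt
  by_cases h1 : id_eq = "mangeoire"
  · subst h1; decide
  · by_cases h2 : id_eq = "roue"
    · subst h2; decide
    · by_cases h3 : id_eq = "nid"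
      · subst h3; decide
      · simp [pvALoop, h1, h2, h3,
              Ne.symm h1, Ne.symm h2]
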